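-- pv_equiv track=rewrite | github.com/AdamZhouSE/pythonHomework | Code/CodeRecords/2182/60634/292123.py | go
-- ===== SOURCE A (Python) =====
-- def go(arr, i, k):
--     if i == len(arr):
--         i = 0
--     k -= 1
--     while k != 0:
--         i = (i + 1) % len(arr)
--         k -= 1
--     return i
-- ===== SOURCE B (Python) =====
-- def go(arr, i, k):
--     n = len(arr)
--     if i == n:
--         i = 0
--     if k == 1:
--         return i
--     return (i + k - 1) % n
-- ===== Notes on version B (the rewrite author's own statement) =====
-- stated objective: faster
-- what changed: Replaces A's step-by-step loop of k-1 single increments modulo len(arr) with one closed-form modular computation (i0 + k - 1) % len(arr) (with an early return for k == 1, where no step is taken).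
import Mathlib
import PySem

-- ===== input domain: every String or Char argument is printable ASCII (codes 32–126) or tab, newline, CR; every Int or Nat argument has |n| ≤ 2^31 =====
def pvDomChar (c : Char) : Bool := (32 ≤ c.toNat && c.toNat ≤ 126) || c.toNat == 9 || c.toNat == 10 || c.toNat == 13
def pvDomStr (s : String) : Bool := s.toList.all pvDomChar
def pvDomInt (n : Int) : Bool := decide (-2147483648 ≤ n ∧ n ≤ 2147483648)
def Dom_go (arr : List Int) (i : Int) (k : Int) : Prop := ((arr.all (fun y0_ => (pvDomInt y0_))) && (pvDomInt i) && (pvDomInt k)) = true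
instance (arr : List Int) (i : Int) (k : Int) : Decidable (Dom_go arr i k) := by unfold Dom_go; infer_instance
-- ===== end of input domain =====

-- B replaces A's O(k) loop of single increments modulo len(arr) with one closed-form
-- modular computation (objective: faster, asymptotic).

-- ===== PORT A =====
-- the while-loop: runs once per remaining step, i = (i + 1) % n each time
def goLoop : Nat → Int → Int → Int
  | 0, i, _ => i
  | m + 1, i, n => goLoop m (PySem.Int.mod (i + 1) n) n

def go (arr : List Int) (i : Int) (k : Int) : Int :=
  let i0 : Int := if i = (arr.length : Int) then 0 else i
  goLoop (k - 1).toNat i0 (arr.length : Int)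

-- ===== PORT B =====
def go_alt (arr : List Int) (i : Int) (k : Int) : Int :=
  let n : Int := (arr.length : Int)
  let i0 : Int := if i = n then 0 else i
  if k = 1 then i0 else PySem.Int.mod (i0 + k - 1) n

-- ===== PRECONDITION & SPEC =====
-- Pre_ excludes exactly the inputs where A does not return: k ≤ 0 (infinite loop) and
-- arr = [] with k ≥ 2 (ZeroDivisionError on the first loop iteration).
def Pre_go (arr : List Int) (i : Int) (k : Int) : Prop := 1 ≤ k ∧ (arr ≠ [] ∨ k = 1)
instance (arr : List Int) (i : Int) (k : Int) : Decidable (Pre_go arr i k) := by unfold Pre_go; infer_instance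
def pvWitness_go : List Int × Int × Int := ([3, 1, 2], 1, 5)
def Spec_go (arr : List Int) (i : Int) (k : Int) (out : Int) : Prop := out = go_alt arr i k
instance (arr : List Int) (i : Int) (k : Int) (out : Int) : Decidable (Spec_go arr i k out) := by unfold Spec_go; infer_instance

-- ===== CLAIM (what is proved, stated in full; the proofs are below) =====
def Claim_equal_go : Prop := ∀ (arr : List Int) (i : Int) (k : Int), Dom_go arr i k → Pre_go arr i k → Spec_go arr i k (go arr i k)

-- ===== LEMMAS AND PROOFS =====

-- after the first iteration the index is in [0, n); from there each step adds 1 mod n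
theorem goLoop_closed (n : Int) (hn : 0 < n) :
    ∀ (m : Nat) (j : Int), 0 ≤ j → j < n → goLoop m j n = (j + m) % n := by
  intro m
  induction m with
  | zero =>
    intro j h0 h1
    simp [goLoop, Int.emod_eq_of_lt h0 h1]
  | succ m ih =>
    intro j _ _
    rw [goLoop, PySem.Int.mod_eq_emod_of_pos hn,
      ih _ (Int.emod_nonneg _ (by omega)) (Int.emod_lt_of_pos _ hn), Int.emod_add_emod]
    push_cast
    ring_nf

theorem go_spec : Claim_equal_go := by
  intro arr i k _ hpre
  obtain ⟨hk, hcase⟩ := hpre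
  unfold Spec_go go go_alt
  by_cases hk1 : k = 1
  · subst hk1; simp [goLoop]
  · have hne : arr ≠ [] := by tauto
    have hn : 0 < (arr.length : Int) := by
      have : arr.length ≠ 0 := fun h => hne (List.eq_nil_of_length_eq_zero h)
      omega
    have hsplit : (k - 1).toNat = (k - 2).toNat + 1 := by omega
    simp only [hsplit, if_neg hk1]
    rw [goLoop, PySem.Int.mod_eq_emod_of_pos hn,
      goLoop_closed _ hn _ _ (Int.emod_nonneg _ (by omega)) (Int.emod_lt_of_pos _ hn),
      Int.emod_add_emod, PySem.Int.mod_eq_emod_of_pos hn]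
    have hcast : ((k - 2).toNat : Int) = k - 2 := by omega
    rw [hcast]
    ring_nf
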